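-- pv_equiv track=rewrite | github.com/chris-dahlin/dev_accelerator | __devx/CS_50/CS50_AI/Project0/tictactoe/tictactoe.py | checkSecondDiag
-- ===== SOURCE A (Python) =====
-- X = "X"
--
-- O = "O"
--
-- def player(board):
--     """
--     Returns player who has the next turn on a board.
--     """
--     countX = 0
--     countO = 0
--
--     for row in range(len(board)):
--         for col in range(len(board[row])):
--             if board[row][col] == X:
--                 countX += 1
--             if board[row][col] == O:
--                 countO += 1
--
--     if countX > countO:
--         return O
--     else:
--         return X
--
-- def checkSecondDiag(board, player):
--     count = 0
--     for row in range(len(board)):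
--         for col in range(len(board)):
--             if (len(board) - row - 1) == col and board[row][col] == player:
--                 count +=1
--     if count == 3:
--         return True
--     else:
--         return False
-- ===== SOURCE B (Python) =====
-- def checkSecondDiag(board, player):
--     n = len(board)
--     diag = [row[n - 1 - i] for i, row in enumerate(board)]
--     return diag.count(player) == 3
-- ===== Notes on version B (the rewrite author's own statement) =====
-- stated objective: faster
-- what changed: Instead of A's nested n x n scan testing every (row,col) pair against the anti-diagonal equation, B materialises the anti-diagonal as a list with enumerate (row[n-1-i]) and uses list.count to compare against 3.
import Mathlib
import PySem

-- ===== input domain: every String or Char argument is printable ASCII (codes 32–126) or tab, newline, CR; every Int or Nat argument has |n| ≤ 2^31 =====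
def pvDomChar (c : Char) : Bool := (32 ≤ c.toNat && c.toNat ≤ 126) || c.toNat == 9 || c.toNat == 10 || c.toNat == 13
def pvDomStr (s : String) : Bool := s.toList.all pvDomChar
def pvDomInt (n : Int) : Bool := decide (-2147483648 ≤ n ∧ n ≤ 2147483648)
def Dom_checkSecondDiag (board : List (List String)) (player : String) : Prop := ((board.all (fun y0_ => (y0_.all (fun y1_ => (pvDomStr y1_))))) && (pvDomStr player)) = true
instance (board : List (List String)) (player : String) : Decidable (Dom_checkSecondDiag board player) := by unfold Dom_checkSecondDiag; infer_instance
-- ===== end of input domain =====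

-- B replaces A's nested n×n scan with an enumerate-built anti-diagonal list counted once (objective: faster).

-- ===== PORT A =====
-- Literal port of A: nested loops over rows and cols, counting cells on the anti-diagonal
-- equal to player; pyGetD is exact wherever the Python returns (Pre_ excludes the IndexError rows).
def checkSecondDiag (board : List (List String)) (player : String) : Bool :=
  let n : Int := board.length
  let count : Int :=
    (PySem.List.pyRange 0 n 1).foldl (fun c row =>
      (PySem.List.pyRange 0 n 1).foldl (fun c col =>
        if (n - row - 1 == col) && (PySem.List.pyGetD (PySem.List.pyGetD board row []) col "" == player)
        then c + 1 else c) c) 0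
  count == 3

-- ===== PORT B =====
-- Literal port of B: build the anti-diagonal via enumerate, then count player's occurrences.
def checkSecondDiag_alt (board : List (List String)) (player : String) : Bool :=
  let n : Int := board.length
  let diag : List String :=
    (PySem.List.enumerate board).map (fun p => PySem.List.pyGetD p.2 (n - 1 - p.1) "")
  PySem.List.count diag player == 3

-- ===== PRECONDITION & SPEC =====
-- Pre_ excludes exactly the inputs where the Python raises IndexError: some row of the
-- board is too short to contain its anti-diagonal cell board[row][len(board)-row-1].
def Pre_checkSecondDiag (board : List (List String)) (player : String) : Prop :=
  ((List.range board.length).all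
    (fun k => decide (board.length - 1 - k < (board.getD k []).length))) = true
instance (board : List (List String)) (player : String) : Decidable (Pre_checkSecondDiag board player) := by unfold Pre_checkSecondDiag; infer_instance

def pvWitness_checkSecondDiag : List (List String) × String :=
  ([["", "", "X"], ["", "X", ""], ["X", "", ""]], "X")

def Spec_checkSecondDiag (board : List (List String)) (player : String) (out : Bool) : Prop := out = checkSecondDiag_alt board player
instance (board : List (List String)) (player : String) (out : Bool) : Decidable (Spec_checkSecondDiag board player out) := by unfold Spec_checkSecondDiag; infer_instance

-- ===== CLAIM (what is proved, stated in full; the proofs are below) =====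
def Claim_equal_checkSecondDiag : Prop := ∀ (board : List (List String)) (player : String), Dom_checkSecondDiag board player → Pre_checkSecondDiag board player → Spec_checkSecondDiag board player (checkSecondDiag board player)

-- ===== LEMMAS AND PROOFS =====

-- If t does not occur in L, A's inner loop over L leaves the accumulator unchanged.
theorem pvFoldlNotMem (t : Int) (p : Int → Bool) (L : List Int) (c : Int) (h : t ∉ L) :
    L.foldl (fun c col => if (t == col) && p col then c + 1 else c) c = c := by
  induction L generalizing c with
  | nil => rfl
  | cons a L ih =>
      simp only [List.mem_cons, not_or] at h
      simp only [List.foldl_cons]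
      have : (t == a) = false := by simpa [beq_iff_eq] using h.1
      rw [this]
      simpa using ih c h.2

-- If t occurs exactly once in L, A's inner loop over L adds 1 exactly when p t holds.
theorem pvFoldlOnce (t : Int) (p : Int → Bool) (L : List Int) (c : Int) (h : L.count t = 1) :
    L.foldl (fun c col => if (t == col) && p col then c + 1 else c) c
      = if p t then c + 1 else c := by
  induction L generalizing c with
  | nil => simp at h
  | cons a L ih =>
      by_cases ha : t = a
      · subst ha
        simp only [List.count_cons_self] at h
        have h0 : L.count t = 0 := by omega
        have hnm : t ∉ L := by simpa using (List.count_eq_zero.mp h0)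
        simp only [List.foldl_cons, BEq.rfl, Bool.true_and]
        cases hp : p t with
        | true =>
            simp only [if_true]
            exact pvFoldlNotMem t p L (c + 1) hnm
        | false =>
            simp only [if_neg Bool.false_ne_true]
            exact pvFoldlNotMem t p L c hnm
      · have : (t == a) = false := by simpa [beq_iff_eq] using ha
        simp only [List.foldl_cons, this, Bool.false_and, if_neg Bool.false_ne_true]
        refine ih c ?_
        have hne : a ≠ t := fun e => ha e.symm
        simpa [List.count_cons, hne] using h

-- t occurs exactly once in range(0, n) when 0 ≤ t < n.
theorem pvCountRange (n t : Int) (h0 : 0 ≤ t) (h1 : t < n) :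
    (PySem.List.pyRange 0 n 1).count t = 1 := by
  apply List.count_eq_one_of_mem
  · obtain ⟨m, rfl⟩ : ∃ m : Nat, n = (m : Int) := ⟨n.toNat, by omega⟩
    rw [PySem.List.pyRange_zero_natCast]
    exact (List.Nodup.map (fun a b hab => by exact_mod_cast hab) (List.nodup_range))
  · exact (PySem.List.mem_pyRange_one).mpr ⟨h0, h1⟩

-- ===== VERDICT (by name: the statement is the Claim_ definition above) =====
theorem checkSecondDiag_spec : Claim_equal_checkSecondDiag := by
  intro board player _ _
  unfold Spec_checkSecondDiag checkSecondDiag checkSecondDiag_alt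
  simp only []
  set n : Int := (board.length : Int) with hn
  -- reduce A's inner loop: the target column n - row - 1 is hit exactly once
  have hA :
      (PySem.List.pyRange 0 n 1).foldl (fun (c : Int) row =>
        (PySem.List.pyRange 0 n 1).foldl (fun (c : Int) col =>
          if (n - row - 1 == col) && (PySem.List.pyGetD (PySem.List.pyGetD board row []) col "" == player)
          then c + 1 else c) c) 0
      = (PySem.List.pyRange 0 n 1).foldl (fun (c : Int) row =>
          if PySem.List.pyGetD (PySem.List.pyGetD board row []) (n - row - 1) "" == player
          then c + 1 else c) 0 := by
    apply PySem.List.foldl_congr_mem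
    intro c row hrow
    obtain ⟨hr0, hr1⟩ := (PySem.List.mem_pyRange_one).mp hrow
    exact pvFoldlOnce (n - row - 1)
      (fun col => PySem.List.pyGetD (PySem.List.pyGetD board row []) col "" == player)
      (PySem.List.pyRange 0 n 1) c (pvCountRange _ _ (by omega) (by omega))
  rw [hA]
  -- rewrite B's diag as a map over pyRange and turn its count into A's counting fold
  have hdiag :
      (PySem.List.enumerate board).map (fun p => PySem.List.pyGetD p.2 (n - 1 - p.1) "")
      = (PySem.List.pyRange 0 n 1).map
          (fun j => PySem.List.pyGetD (PySem.List.pyGetD board j []) (n - 1 - j) "") := by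
    rw [PySem.List.enumerate_eq_map_pyRange board ([] : List String), List.map_map,
      PySem.List.len_eq]
    rfl
  rw [PySem.List.count_eq, hdiag]
  have hcnt :
      ((((PySem.List.pyRange 0 n 1).map
          (fun j => PySem.List.pyGetD (PySem.List.pyGetD board j []) (n - 1 - j) "")).count player : Int))
      = (PySem.List.pyRange 0 n 1).foldl (fun (c : Int) row =>
          if PySem.List.pyGetD (PySem.List.pyGetD board row []) (n - row - 1) "" == player
          then c + 1 else c) 0 := by
    have h1 := PySem.List.foldl_beq_add_one
      ((PySem.List.pyRange 0 n 1).map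
        (fun j => PySem.List.pyGetD (PySem.List.pyGetD board j []) (n - 1 - j) "")) player 0
    rw [List.foldl_map, zero_add] at h1
    rw [← h1]
    apply PySem.List.foldl_congr_mem
    intro c j _
    have hj : n - 1 - j = n - j - 1 := by omega
    rw [hj]
  rw [← hcnt]
  cases hc : ((PySem.List.pyRange 0 n 1).map
      (fun j => PySem.List.pyGetD (PySem.List.pyGetD board j []) (n - 1 - j) "")).count player with
  | zero => simp
  | succ m => simp; omega
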